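-- pv_equiv track=rewrite | github.com/rdguha1995/bondnet_sv | bondnet/data/lmdb_dataset.py | divide_to_list
-- ===== SOURCE A (Python) =====
-- def divide_to_list(a, b):
--     quotient = a // b
--     remainder = a % b
--
--     result = []
--     for i in range(b):
--         increment = 1 if i < remainder else 0
--         result.append(quotient + increment)
--
--     return result
-- ===== SOURCE B (Python) =====
-- def divide_to_list(a, b):
--     # Greedy: peel off the next part as the ceiling of what's left over the
--     # parts that remain; no quotient/remainder of the original (a, b) is taken.
--     result = []
--     while b > 0:
--         p = -(-a // b)  # ceil(a / b)
--         result.append(p)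
--         a -= p
--         b -= 1
--     return result
-- ===== Notes on version B (the rewrite author's own statement) =====
-- stated objective: alternative
-- what changed: Replaces the precomputed quotient/remainder plus per-index conditional by a greedy loop that repeatedly peels off ceil(remaining/parts_left) and shrinks the problem; no a//b or a%b of the original pair is computed.
import Mathlib
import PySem

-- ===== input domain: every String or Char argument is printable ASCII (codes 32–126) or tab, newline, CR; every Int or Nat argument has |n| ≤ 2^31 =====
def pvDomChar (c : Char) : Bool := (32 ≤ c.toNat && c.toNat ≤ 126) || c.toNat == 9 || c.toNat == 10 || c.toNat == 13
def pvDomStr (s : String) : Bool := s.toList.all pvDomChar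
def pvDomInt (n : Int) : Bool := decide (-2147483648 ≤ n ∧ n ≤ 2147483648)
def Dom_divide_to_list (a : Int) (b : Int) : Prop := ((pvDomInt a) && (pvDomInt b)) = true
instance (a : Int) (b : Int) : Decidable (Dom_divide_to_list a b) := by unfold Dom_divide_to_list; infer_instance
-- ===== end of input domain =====

-- B replaces A's quotient/remainder-plus-conditional loop by a greedy loop peeling off
-- ceil(remaining / parts_left) each step; return values only, no observable mutation.

-- ===== PORT A =====
def divide_to_list (a : Int) (b : Int) : List Int :=
  let quotient := PySem.Int.floordiv a b
  let remainder := PySem.Int.mod a b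
  (PySem.List.pyRange 0 b 1).foldl
    (fun result i =>
      let increment : Int := if i < remainder then 1 else 0
      result ++ [quotient + increment]) []

-- ===== PORT B =====
-- the 'while b > 0' loop of Source B, state (a, b, result); the Nat fuel b.toNat only
-- makes the recursion structural, it equals the loop's iteration count
def divideAltLoop : Nat → Int → Int → List Int → List Int
  | 0, _, _, result => result
  | n + 1, a, b, result =>
    if 0 < b then
      let p := -(PySem.Int.floordiv (-a) b)
      divideAltLoop n (a - p) (b - 1) (result ++ [p])
    else result

def divide_to_list_alt (a : Int) (b : Int) : List Int :=
  divideAltLoop b.toNat a b []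

-- ===== PRECONDITION & SPEC =====
-- Pre_ excludes exactly b = 0, where A raises ZeroDivisionError.
def Pre_divide_to_list (a : Int) (b : Int) : Prop := b ≠ 0
instance (a : Int) (b : Int) : Decidable (Pre_divide_to_list a b) := by unfold Pre_divide_to_list; infer_instance
def pvWitness_divide_to_list : Int × Int := (7, 3)

def Spec_divide_to_list (a : Int) (b : Int) (out : List Int) : Prop := out = divide_to_list_alt a b
instance (a : Int) (b : Int) (out : List Int) : Decidable (Spec_divide_to_list a b out) := by unfold Spec_divide_to_list; infer_instance

-- ===== CLAIM =====
def Claim_equal_divide_to_list : Prop := ∀ (a : Int) (b : Int), Dom_divide_to_list a b → Pre_divide_to_list a b → Spec_divide_to_list a b (divide_to_list a b)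

-- ===== LEMMAS AND PROOFS =====

-- A's loop over range(b): indices below r map to q+1, the rest to q.
lemma map_ite_range (n : Nat) (q r : Int) :
    ((List.range n).map (fun k : Nat => (k : Int))).map
        (fun i => q + if i < r then 1 else 0)
      = List.replicate (min r.toNat n) (q + 1) ++ List.replicate (n - min r.toNat n) q := by
  induction n with
  | zero => simp
  | succ n ih =>
    rw [List.range_succ]
    simp only [List.map_append, List.map_cons, List.map_nil]
    rw [ih]
    by_cases h : (n : Int) < r
    · have hr : min r.toNat (n + 1) = n + 1 := by omega
      have hr' : min r.toNat n = n := by omega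
      rw [hr, hr', if_pos h]
      simp [List.replicate_succ']
    · have hr' : min r.toNat (n + 1) = min r.toNat n := by omega
      rw [hr', if_neg h]
      have : n + 1 - min r.toNat n = (n - min r.toNat n) + 1 := by omega
      rw [this, List.replicate_succ' (n := n - min r.toNat n)]
      simp

-- B's greedy loop computes the same replicate-shaped closed form, for b = n+1 > 0.
lemma divideAltLoop_closed (n : Nat) :
    ∀ (a : Int) (res : List Int),
      divideAltLoop (n + 1) a ((n : Int) + 1) res
        = res ++ List.replicate (PySem.Int.mod a ((n : Int) + 1)).toNat
                   (PySem.Int.floordiv a ((n : Int) + 1) + 1)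
              ++ List.replicate (((n : Int) + 1) - PySem.Int.mod a ((n : Int) + 1)).toNat
                   (PySem.Int.floordiv a ((n : Int) + 1)) := by
  induction n with
  | zero =>
    intro a res
    have hp : -(PySem.Int.floordiv (-a) (((0 : Nat) : Int) + 1)) = a := by
      rw [PySem.Int.neg_floordiv_neg_eq_iff_of_pos (by norm_num)]
      push_cast; constructor <;> omega
    have hq : PySem.Int.floordiv a (((0 : Nat) : Int) + 1) = a := by
      rw [PySem.Int.floordiv_eq_iff_of_pos (by norm_num)]
      push_cast; constructor <;> omega
    have hr : PySem.Int.mod a (((0 : Nat) : Int) + 1) = 0 := by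
      have := PySem.Int.floordiv_mul_add_mod a (((0 : Nat) : Int) + 1)
      rw [hq] at this; push_cast at this ⊢; omega
    simp only [divideAltLoop, hp, hq, hr]
    push_cast
    norm_num
  | succ n ih =>
    intro a res
    set b : Int := ((n : Int) + 1) + 1 with hb
    have hbpos : 0 < b := by omega
    set q := PySem.Int.floordiv a b with hqdef
    set r := PySem.Int.mod a b with hrdef
    have hsum : q * b + r = a := PySem.Int.floordiv_mul_add_mod a b
    have hr0 : 0 ≤ r := PySem.Int.mod_nonneg a hbpos
    have hr1 : r < b := PySem.Int.mod_lt a hbpos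
    have hcast : (((n + 1 : Nat) : Int) + 1) = b := by push_cast [hb]; ring
    show (if 0 < (((n + 1 : Nat) : Int) + 1) then _ else res) = _
    rw [hcast, if_pos hbpos]
    rw [show b - 1 = (n : Int) + 1 from by omega]
    by_cases hcase : r = 0
    · -- first part is q; residual a - q over n+1 parts has quotient q, remainder 0
      have hp : -(PySem.Int.floordiv (-a) b) = q := by
        rw [PySem.Int.neg_floordiv_neg_eq_iff_of_pos hbpos]
        constructor <;> nlinarith
      have hq' : PySem.Int.floordiv (a - q) ((n : Int) + 1) = q := by
        rw [PySem.Int.floordiv_eq_iff_of_pos (by omega)]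
        constructor <;> nlinarith
      have hr' : PySem.Int.mod (a - q) ((n : Int) + 1) = 0 := by
        have := PySem.Int.floordiv_mul_add_mod (a - q) ((n : Int) + 1)
        rw [hq'] at this; nlinarith
      rw [hp, ih (a - q) (res ++ [q])]
      rw [hq', hr', ← hqdef, ← hrdef, hcase]
      have h1 : ((n : Int) + 1 - 0).toNat = n + 1 := by omega
      have h2 : (b - (0 : Int)).toNat = n + 2 := by omega
      simp only [h1, h2]
      simp [List.replicate_succ, List.append_assoc]
    · -- first part is q + 1; residual has quotient q, remainder r - 1
      have hrpos : 0 < r := by omega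
      have hp : -(PySem.Int.floordiv (-a) b) = q + 1 := by
        rw [PySem.Int.neg_floordiv_neg_eq_iff_of_pos hbpos]
        constructor <;> nlinarith
      have hq' : PySem.Int.floordiv (a - (q + 1)) ((n : Int) + 1) = q := by
        rw [PySem.Int.floordiv_eq_iff_of_pos (by omega)]
        constructor <;> nlinarith
      have hr' : PySem.Int.mod (a - (q + 1)) ((n : Int) + 1) = r - 1 := by
        have := PySem.Int.floordiv_mul_add_mod (a - (q + 1)) ((n : Int) + 1)
        rw [hq'] at this; nlinarith
      rw [hp, ih (a - (q + 1)) (res ++ [q + 1])]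
      rw [hq', hr', ← hqdef, ← hrdef]
      have h1 : (r - 1).toNat + 1 = r.toNat := by omega
      have h2 : ((n : Int) + 1 - (r - 1)).toNat = (b - r).toNat := by omega
      rw [h2, ← h1]
      simp [List.replicate_succ, List.append_assoc]

-- ===== VERDICT =====
theorem divide_to_list_spec : Claim_equal_divide_to_list := by
  intro a b _ hb
  unfold Pre_divide_to_list at hb
  unfold Spec_divide_to_list divide_to_list divide_to_list_alt
  simp only []
  set q := PySem.Int.floordiv a b with hq
  set r := PySem.Int.mod a b with hr
  rw [PySem.List.foldl_append_singleton_eq_map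
      (f := fun i => q + if i < r then 1 else 0)]
  rw [PySem.List.pyRange_one]
  simp only [sub_zero, zero_add]
  by_cases hbneg : b < 0
  · -- b < 0: A's range is empty; B's loop (fuel b.toNat = 0) never runs
    have h1 : b.toNat = 0 := by omega
    simp [h1, divideAltLoop]
  · have hb0 : 0 < b := by omega
    have hr0 : 0 ≤ r := by rw [hr]; exact PySem.Int.mod_nonneg a hb0
    have hr1 : r < b := by rw [hr]; exact PySem.Int.mod_lt a hb0
    rw [map_ite_range b.toNat q r]
    obtain ⟨n, hn⟩ : ∃ n : Nat, b = (n : Int) + 1 := ⟨(b - 1).toNat, by omega⟩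
    have hnt : b.toNat = n + 1 := by omega
    rw [hnt, hn, divideAltLoop_closed n a []]
    rw [hn] at hq hr
    rw [← hq, ← hr]
    have hmin : min r.toNat (n + 1) = r.toNat := by omega
    rw [hmin, show n + 1 - r.toNat = (((n : Int) + 1) - r).toNat from by omega]
    simp
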